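/- GENERATED by tools/from_farm_form.py from prooffarm-gif/accepted/digest_file.4/Proof.lean (a worked proof of the farm's unit `digest_file.4`,
   accepted by the verdict) — do not edit. -/
import Gif.Spec.Units.digest_file_4
import Gif.Spec.AllSegs

open X86 X86.User Asan ProgX.Base ProgX.Base.Spec Gif.Spec

set_option maxRecDepth 4000
set_option maxHeartbeats 4000000

namespace Gif.Spec.digest_file_4

/-- **The 64-bit product of two positive `int`s whose product is an `int`** (`imul rbp, rax` at 1058EAH, gif_driver.c:160: both
factors are the sign extensions of `Width` and `Height`, rewritten to `UInt64.ofNat` by `cnt32_sext_bv`): the product is exact. -/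
theorem df4_mul_exact (W Hh : Nat) (hW : W < 2 ^ 31) (hH : Hh < 2 ^ 31) (hp : W * Hh < 2 ^ 31) :
    (UInt64.ofNat W * UInt64.ofNat Hh).toNat = W * Hh := by
  rw [UInt64.toNat_mul, toNat_ofNat_addr W (by omega), toNat_ofNat_addr Hh (by omega)]
  exact Nat.mod_eq_of_lt (by omega)

/-- **A read of 4 bytes inside the slot `[sp, sp + 56)` of the heap misses the function's stack window** `[RA − 224, RA − 64)`
(the side condition of `Mem.SameExcept.rd` for `Width` / `Height` at the exit). -/
theorem df4_slot_miss (RA sp : Nat) (hRA : RA + 8 ≤ 0x800000) (hsp : 0x800040 ≤ sp) (off : Nat) :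
    ∀ w, w ∈ ([⟨RA - 224, RA - 64⟩] : List Span) → sp + off + 4 ≤ w.lo ∨ w.hi ≤ sp + off := by
  intro w hw
  have hw_eq := List.mem_singleton.mp hw
  rw [hw_eq]
  simp only
  omega

/-- **The slot of `ImageCount`, `[RA − 76, RA − 72)`, misses a window `[RA − 112, RA − hi)` with `hi ≥ 80`**: what a call of
`digest_int` (and the store of `h` to `[rsp]` = RA − 88 in front of the second) writes lies below the slot. -/
theorem df4_count_miss (RA hi : Nat) (hhi : 80 ≤ hi) :
    ∀ w, w ∈ ([⟨RA - 112, RA - hi⟩] : List Span) → RA - 76 + 4 ≤ w.lo ∨ w.hi ≤ RA - 76 := by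
  intro w hw
  have hw_eq := List.mem_singleton.mp hw
  rw [hw_eq]
  simp only
  omega

end Gif.Spec.digest_file_4

/-- Segment 4 of `digest_file` (1059AFH … 1059BAH, 1058A9H … 10591AH; gif_driver.c:158-163): THE LOOP TEST and the first part of one
round, from `Head m`. With `k = r13`:
  * `k ≥ length` (`cmp [rsp+0xc], r13d ; jg` not taken): to 1059BAH, `At`; nothing was stored.
  * `k < length`: there is an array `s` (`digest_file.slotAt`), the slot `sp = s.arr + 56·k` lies inside the live array
    `(s.arr, 56 · s.cap)`; the image is complete, so `RasterAt` gives `1 ≤ Width`, `1 ≤ Height`, `Width · Height < 2^31`.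
    The checked load of `gif->SavedImages` (inside `(F.gif, 120)`), `rbx = sp` (`word_times56_shl`), the checked loads of `Width`,
    `Height` (`rbp` = the exact product), of `Left`, `Top` with their `digest_int`: `Round` at 10591AH.
  The only stores are return addresses at `[RA − 96, RA − 88)`, `h` at `[RA − 88, RA − 80)` and the two callees' 16 bytes below:
  `At` is carried by `digest_file.At.carry`, once behind each `digest_int` (the first returned state is THE HUB `hat1`).
    BLOCKS: 1 the prelude of a segment; the registers as equations
            2 `k < length`: the array, the slot, `Width` / `Height`, the loads as facts
            3 walk to 1058CEH (`rbx = sp`), walk to the first `digest_int`; the hub behind it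
            4 walk to the second `digest_int`; `Round` at 10591AH
            5 `k ≥ length`: the exit 1059BAH -/
theorem Gif.Spec.Proved.digest_file_4_ok : Gif.Spec.digest_file_4.Statement := by
  intro Lay hLay μ hμ u₀ hcode h_int h_load8 h_load4 H rest frames F R e ret m v hhead
  obtain ⟨hat, h_count, h_kle, h_meas⟩ := hhead
  -- 1. THE PRELUDE OF A SEGMENT: the entry, the pre, where gif is
  have he := hat.entry
  v_entry he
  obtain ⟨henv, hcompl, hrdi, hpix, hpixlo, hpixhi⟩ := hat.pre
  have hbase := henv.heap.base
  have hok := hat.inv.heap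
  have hgok := hat.ok
  obtain ⟨hgif1, hgif2, -⟩ := hgok.gif_where hok hbase
  have hlg : LiveIn (H.liveObjs ++ rest) frames F.gif 120 :=
    hgok.gif_live.liveIn rest frames (Nat.le_refl _) (Nat.le_refl _)
  -- the present state, in the walker's names
  have w_rip := hat.rip
  have c_rsp : v.reg .rsp = e.reg .rsp - 88 := hat.rsp
  have w_eq : Mem.EqOn ProgX.Base.L.textLo ProgX.Base.L.textHi u₀.mem v.mem := ProgX.Base.conv_code_eqOn hat.code
  have hdf : v.flags .df = false := (show abiInv _ from hat.abi).1
  have hmx : v.mxcsr &&& 0x1F80 = 0x1F80 := (show abiInv _ from hat.abi).2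
  have hsse := ProgX.Base.sseOK_of_abiInv hat.abi
  have w_kept : RegsKept [.rsp] v v := RegsKept.refl _ _
  -- the registers as equations: `r12 = gif`, `r13 = k`; the slot of `ImageCount`
  have c_r12 : v.reg .r12 = UInt64.ofNat F.gif := by
    rw [hat.r12]
    exact Word.eq_ofNat_of_toNat hrdi
  obtain ⟨k, h_k⟩ : ∃ k, (v.reg .r13).toNat = k := ⟨_, rfl⟩
  rw [h_k] at h_kle h_meas
  have c_r13 : v.reg .r13 = UInt64.ofNat k := Word.eq_ofNat_of_toNat h_k
  have l_count : v.mem.readLE (e.reg .rsp - 76) 4 = F.imgs.length := h_count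
  by_cases hklt : k < F.imgs.length
  · -- 2. `k < length`: THE ARRAY `s`, live with `56 · cap` bytes in the heap's region, `gif->SavedImages = s.arr`
    obtain ⟨s, hk', hsaved, hsarr, hlencap, himg⟩ := digest_file.slotAt hgok.shape hklt
    have harr := digest_file.owns_arr hgok hsaved
    obtain ⟨harr1, harr2⟩ := harr.range hbase hok
    have hla : LiveIn (H.liveObjs ++ rest) frames s.arr (56 * s.cap) :=
      harr.liveIn rest frames (Nat.le_refl _) (Nat.le_refl _)
    simp only [gfield] at hsarr
    have l_saved : v.mem.readLE (UInt64.ofNat F.gif + 72) 8 = s.arr := by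
      rw [rd_eq_readLE v.mem _ (F.gif + 72) 8 (by u_omega)]
      exact hsarr
    have hlen : F.imgs.length = s.imgs.length := by
      unfold Forest.imgs
      rw [hsaved]
    -- the count is an `int`: `length ≤ cap`, and `56 · cap` bytes lie in the 4 MB heap
    have hk31 : k < 2 ^ 31 := by omega
    have hl31 : F.imgs.length < 2 ^ 31 := by omega
    -- THE SLOT `sp = s.arr + 56·k`, inside the array
    obtain ⟨sp, hsp⟩ : ∃ sp, s.arr + 56 * k = sp := ⟨_, rfl⟩
    have hsp1 : s.arr ≤ sp := by omega
    have hsp2 : sp + 56 ≤ s.arr + 56 * s.cap := by omega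
    rw [hsp] at himg
    -- `Width`, `Height`: the image is complete, so `RasterAt` bounds them (SV4)
    have hras := himg.raster
    obtain ⟨r, hr⟩ : ∃ r, s.imgs[k].raster = some r := by
      cases hr : s.imgs[k].raster with
      | none => exact absurd hr (hcompl s hsaved s.imgs[k] (List.getElem_mem hk'))
      | some r => exact ⟨r, rfl⟩
    rw [hr] at hras
    obtain ⟨-, hprod, hW1, hH1, hr31⟩ := hras
    obtain ⟨W, hW⟩ : ∃ W, SavedImage.ImageDesc.Width v.mem sp = W := ⟨_, rfl⟩
    obtain ⟨Hh, hHh⟩ : ∃ Hh, SavedImage.ImageDesc.Height v.mem sp = Hh := ⟨_, rfl⟩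
    rw [hW, hHh] at hprod
    rw [hW] at hW1
    rw [hHh] at hH1
    have hWle : W ≤ W * Hh := Nat.le_mul_of_pos_right W hH1
    have hHle : Hh ≤ W * Hh := Nat.le_mul_of_pos_left Hh hW1
    have hW31 : W < 2 ^ 31 := by omega
    have hH31 : Hh < 2 ^ 31 := by omega
    have hWH31 : W * Hh < 2 ^ 31 := by omega
    -- the two loads as facts, in the walker's form
    simp only [gfield] at hW hHh
    have l_width : v.mem.readLE (UInt64.ofNat sp + 8) 4 = W := by
      rw [rd_eq_readLE v.mem _ (sp + 8) 4 (by u_omega)]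
      exact hW
    have l_height : v.mem.readLE (UInt64.ofNat sp + 12) 4 = Hh := by
      rw [rd_eq_readLE v.mem _ (sp + 12) 4 (by u_omega)]
      exact hHh
    -- 3. THE WALK: 0x1059af `cmp [rsp+0xc], r13d ; jg` (gif_driver.c:158), to 0x1058ce (`movsxd rax, r13d` is `UInt64.ofNat k`)
    u_walk hcode [hμ.vendor, Gif.Spec.cnt32_sext k hk31]
      until [Gif.L.digest_file.chk9, Gif.L.digest_file.at_1059ba]
      span [ProgX.Base.L.textLo, ProgX.Base.L.textHi] side (v_side)
    case check_1058ae =>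
      -- 0x1058ae, gif_driver.c:159: the check of the load `gif->SavedImages`: inside the object `(F.gif, 120)`
      have hun : ShadowUntouched v.mem s_1058ae.mem := by v_untouched
      exact hlg.accSmall hat.inv.shadow hun _ 8 (by decide) (by u_omega) (by u_omega)
    · -- 0x1058ce (gif_driver.c:161): `rbx = (8k − k) << 3 + s.arr = sp`
      rw [word_times56_shl s.arr k hk31 (by omega), hsp] at w_rbx w_rdi
      -- on to the first `digest_int` (`movsxd` of `Width`, `Height`: `UInt64.ofNat W`, `UInt64.ofNat Hh`)
      u_walk hcode [hμ.vendor, Gif.Spec.cnt32_sext_bv W hW31, Gif.Spec.cnt32_sext_bv Hh hH31]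
        until [Gif.L.digest_file.at_10591a, Gif.L.digest_file.at_1059ba]
        span [ProgX.Base.L.textLo, ProgX.Base.L.textHi] side (v_side)
      case check_1058ce =>
        -- 0x1058ce, gif_driver.c:161: the check of the load `sp->ImageDesc.Width` (`sp + 8`): inside the array
        have hun : ShadowUntouched v.mem s_1058ce.mem := by v_untouched
        exact hla.accSmall hat.inv.shadow hun _ 4 (by decide) (by u_omega) (by u_omega)
      case check_1058de =>
        -- 0x1058de, gif_driver.c:161: the check of the load `sp->ImageDesc.Height` (`sp + 12`): inside the array
        have hun : ShadowUntouched v.mem s_1058de.mem := by v_untouched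
        exact hla.accSmall hat.inv.shadow hun _ 4 (by decide) (by u_omega) (by u_omega)
      case check_1058f1 =>
        -- 0x1058f1, gif_driver.c:162: the check of the load `sp->ImageDesc.Left` (`sp + 0`): inside the array
        have hun : ShadowUntouched v.mem s_1058f1.mem := by v_untouched
        exact hla.accSmall hat.inv.shadow hun _ 4 (by decide) (by u_omega) (by u_omega)
      case call_inv =>
        v_inv
      case pre_1058fc =>
        trivial
      -- THE HUB. 0x105901: `digest_int(h, Left)` has returned; it wrote 16 bytes below the return address
      v_after_call w_rsp_1058fc w_mem_1058fc
      -- the slot of `ImageCount` (RA − 76) lies above what the call wrote, `[RA − 112, RA − 88)`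
      have hfine1 : Mem.SameExcept [⟨(e.reg .rsp).toNat - 112, (e.reg .rsp).toNat - 88⟩] v.mem s_1058fcr.mem := by
        u_same
      have k_count1 : s_1058fcr.mem.readLE (e.reg .rsp - 76) 4 = F.imgs.length :=
        slot_sameExcept hfine1 (e.reg .rsp) 76 4 _ (by omega) (by omega) l_count
          (Gif.Spec.digest_file_4.df4_count_miss _ 88 (by omega))
      -- `At` at the returned state
      have hun1 : ShadowUntouched v.mem s_1058fcr.mem := by v_untouched
      have hsame1 : Mem.SameExcept [⟨(e.reg .rsp).toNat - 224, (e.reg .rsp).toNat - 64⟩] v.mem s_1058fcr.mem := by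
        u_same
      have hat1 := hat.carry (cut' := Gif.L.digest_file.ret19) w_rip w_rsp (w_kept.get .r12 rfl) w_code w_inv hun1 hsame1
      have k_r12 : s_1058fcr.reg .r12 = v.reg .r12 := w_kept.get .r12 rfl
      -- 4. 0x105901 (gif_driver.c:162-163): `[rsp] = h`, the check of `Top`, the second `digest_int`
      u_walk hcode [hμ.vendor]
        until [Gif.L.digest_file.at_10591a, Gif.L.digest_file.at_1059ba]
        span [ProgX.Base.L.textLo, ProgX.Base.L.textHi] side (v_side)
      case check_105909 =>
        -- 0x105909, gif_driver.c:163: the check of the load `sp->ImageDesc.Top` (`sp + 4`): inside the array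
        have hun : ShadowUntouched s_1058fcr.mem s_105909.mem := by v_untouched
        exact hla.accSmall hat1.inv.shadow hun _ 4 (by decide) (by u_omega) (by u_omega)
      case call_inv =>
        v_inv
      case pre_105915 =>
        trivial
      -- 0x10591a: `digest_int(h, Top)` has returned: `Round`
      v_after_call w_rsp_105915 w_mem_105915
      -- the slot of `ImageCount` again: the store of `h` and the call wrote `[RA − 112, RA − 80)`
      have hfine2 : Mem.SameExcept [⟨(e.reg .rsp).toNat - 112, (e.reg .rsp).toNat - 80⟩] s_1058fcr.mem s_105915r.mem := by
        u_same
      have k_count2 : s_105915r.mem.readLE (e.reg .rsp - 76) 4 = F.imgs.length :=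
        slot_sameExcept hfine2 (e.reg .rsp) 76 4 _ (by omega) (by omega) k_count1
          (Gif.Spec.digest_file_4.df4_count_miss _ 80 (by omega))
      -- `At` at 10591AH, from the hub
      have hun2 : ShadowUntouched s_1058fcr.mem s_105915r.mem := by v_untouched
      have hsame2 : Mem.SameExcept [⟨(e.reg .rsp).toNat - 224, (e.reg .rsp).toNat - 64⟩] s_1058fcr.mem s_105915r.mem := by
        u_same
      have hat2 := hat1.carry (cut' := Gif.L.digest_file.at_10591a) w_rip w_rsp ((w_kept.get .r12 rfl).trans k_r12.symm)
        w_code w_inv hun2 hsame2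
      -- the slot's fields lie in the heap, off the stack window
      have hmiss := Gif.Spec.digest_file_4.df4_slot_miss (e.reg .rsp).toNat sp he_top (by omega)
      have hmul := Gif.Spec.digest_file_4.df4_mul_exact W Hh hW31 hH31 hWH31
      refine ReachVia.done (Or.inl ⟨hat2, k_count2, ?_, ?_, ⟨s, hsaved, ?_⟩, ?_⟩)
      · -- r13 = k < length: not written
        rw [w_kept.get .r13 rfl, h_k]
        exact hklt
      · -- the measure
        rw [w_kept.get .r13 rfl, h_k]
        exact h_meas
      · -- rbx = sp = s.arr + 56·k
        rw [w_rbx, w_kept.get .r13 rfl, h_k, toNat_ofNat_addr sp (by omega)]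
        exact hsp.symm
      · -- rbp = Width · Height of the slot in the present memory (the slot was not written)
        rw [w_rbp, w_rbx, toNat_ofNat_addr sp (by omega), hmul]
        simp only [gfield]
        rw [hsame2.rd (sp + 8) 4 (by omega) (hmiss 8), hsame1.rd (sp + 8) 4 (by omega) (hmiss 8),
          hsame2.rd (sp + 12) 4 (by omega) (hmiss 12), hsame1.rd (sp + 12) 4 (by omega) (hmiss 12), hW, hHh]
    · -- the arm `k ≥ length` is dead
      exfalso
      rw [cnt32_part, cnt32_toInt k hk31, cnt32_toInt _ hl31] at hbr_1059b4
      omega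
  · -- 5. `k ≥ length`, so `k = length`: THE EXIT of the loop
    have hkeq : k = F.imgs.length := by omega
    u_walk hcode [hμ.vendor]
      until [Gif.L.digest_file.chk8, Gif.L.digest_file.at_1059ba]
      span [ProgX.Base.L.textLo, ProgX.Base.L.textHi] side (v_side)
    · -- the taken arm is dead: both sides of the compare are the same number
      exfalso
      rw [cnt32_part, hkeq] at hbr_1059b4
      exact Int.lt_irrefl _ hbr_1059b4
    · -- 0x1059ba (gif_driver.c:172): behind the loop, `At`; nothing was stored
      have hun : ShadowUntouched v.mem s_1059b4.mem := by v_untouched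
      have hsame : Mem.SameExcept [⟨(e.reg .rsp).toNat - 224, (e.reg .rsp).toNat - 64⟩] v.mem s_1059b4.mem := by
        rw [w_mem]
        exact Mem.SameExcept.refl _ _
      have habi : (conv u₀).inv s_1059b4 := by v_inv
      have hat' := hat.carry (cut' := Gif.L.digest_file.at_1059ba) w_rip w_rsp (w_kept.get .r12 rfl)
        (ProgX.Base.conv_code_in w_eq) habi hun hsame
      exact ReachVia.done (Or.inr hat')
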